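-- pv_equiv track=rewrite | github.com/jayanth920/boss-shell | app/main.py | format_in_columns
-- ===== SOURCE A (Python) =====
-- import math
-- from collections import defaultdict
--
-- RESET = '\033[0m'
--
-- BOLD = '\033[1m'
--
-- def format_in_columns(items, term_width=80, color=RESET):
--     if not items:
--         return ""
--
--     # Get the maximum length of any item
--     max_len = max(len(item) for item in items)
--
--     # Calculate the number of columns
--     num_columns = max(1, term_width // (max_len + 2))
--
--     # Calculate the number of rows
--     num_rows = math.ceil(len(items) / num_columns)
--
--     # Pad the list to fill the grid
--     items = items + [''] * (num_rows * num_columns - len(items))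
--
--     # Create columns with color and bold
--     columns = defaultdict(list)
--     for i, item in enumerate(items):
--         columns[i % num_columns].append(f"{BOLD}{color}{item.ljust(max_len)}{RESET}")
--
--     # Join columns and rows
--     return '\n'.join(' '.join(row) for row in zip(*columns.values()))
-- ===== SOURCE B (Python) =====
-- RESET = '\033[0m'
--
-- BOLD = '\033[1m'
--
-- def format_in_columns(items, term_width=80, color=RESET):
--     if not items:
--         return ""
--     max_len = max(len(item) for item in items)
--     num_columns = max(1, term_width // (max_len + 2))
--     num_rows = -(-len(items) // num_columns)  # ceil division
--     cells = [f"{BOLD}{color}{item.ljust(max_len)}{RESET}"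
--              for item in items + [''] * (num_rows * num_columns - len(items))]
--     return '\n'.join(
--         ' '.join(cells[r * num_columns:(r + 1) * num_columns])
--         for r in range(num_rows))
-- ===== Notes on version B (the rewrite author's own statement) =====
-- stated objective: simpler
-- what changed: Replaces A's column-major defaultdict bucketing (i % num_columns) plus zip(*columns)-transpose with a single row-chunking loop that slices the padded, decorated cell list num_columns at a time; math.ceil is replaced by integer ceiling division.
import Mathlib
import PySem

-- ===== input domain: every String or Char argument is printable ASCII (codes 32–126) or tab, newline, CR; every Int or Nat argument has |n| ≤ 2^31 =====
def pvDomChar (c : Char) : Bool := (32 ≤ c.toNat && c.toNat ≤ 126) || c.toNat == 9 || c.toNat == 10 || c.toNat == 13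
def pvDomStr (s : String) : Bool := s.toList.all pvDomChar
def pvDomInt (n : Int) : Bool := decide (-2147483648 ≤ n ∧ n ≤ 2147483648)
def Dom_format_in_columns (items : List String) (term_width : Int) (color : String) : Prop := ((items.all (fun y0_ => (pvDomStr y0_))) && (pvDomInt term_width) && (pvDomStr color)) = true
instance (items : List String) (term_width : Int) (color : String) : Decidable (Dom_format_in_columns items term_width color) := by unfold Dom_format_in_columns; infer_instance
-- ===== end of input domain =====

-- B replaces A's column-major defaultdict bucketing plus zip(*columns)-transpose by direct
-- row slicing of the padded cell list (objective: simpler; same return value, proved below).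

-- ===== PORT A =====
def pvRESET : String := "\x1b[0m"
def pvBOLD : String := "\x1b[1m"

-- item.ljust(w): pad on the right with spaces to width w (no-op if w ≤ len(item)); exact
def pvLjust (s : String) (w : Int) : String :=
  s ++ String.ofList (List.replicate (w - PySem.Str.len s).toNat ' ')

-- hand port of zip(*cols) (variadic zip has no PySem primitive): rows until some column is exhausted; exact
def pvZipAux (first : List String) (rest : List (List String)) : List (List String) :=
  match first with
  | [] => []
  | a :: as =>
      if rest.all (fun c => !c.isEmpty) then
        (a :: rest.map (fun c => c.headD "")) :: pvZipAux as (rest.map (fun c => c.tail))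
      else []

def pvZipStar (cols : List (List String)) : List (List String) :=
  match cols with
  | [] => []
  | c :: cs => pvZipAux c cs

def format_in_columns (items : List String) (term_width : Int) (color : String) : String :=
  if items = [] then ""
  else
    -- max() raises on [], unreachable here (items ≠ []); .getD 0 is the unreachable default
    let max_len : Int := (PySem.List.max? (items.map (fun it => PySem.Str.len it)) (fun x => x)).getD 0
    let num_columns : Int := max 1 (PySem.Int.floordiv term_width (max_len + 2))
    -- math.ceil(len(items)/num_columns) ported as the exact integer ceiling -((-n)//k)
    let num_rows : Int := -(PySem.Int.floordiv (-(items.length : Int)) num_columns)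
    -- [''] * n is [] for n ≤ 0, matching .toNat
    let padded : List String := items ++ List.replicate ((num_rows * num_columns - (items.length : Int)).toNat) ""
    let columns : PySem.Dict Int (List String) := (PySem.List.enumerate padded).foldl
      (fun d p =>
        d.modify (PySem.Int.mod p.1 num_columns) []
          (fun l => l ++ [pvBOLD ++ color ++ pvLjust p.2 max_len ++ pvRESET]))
      PySem.Dict.empty
    PySem.Str.join "\n" ((pvZipStar columns.values).map (fun row => PySem.Str.join " " row))

-- ===== PORT B =====
def format_in_columns_alt (items : List String) (term_width : Int) (color : String) : String :=
  if items = [] then ""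
  else
    let max_len : Int := (PySem.List.max? (items.map (fun it => PySem.Str.len it)) (fun x => x)).getD 0
    let num_columns : Int := max 1 (PySem.Int.floordiv term_width (max_len + 2))
    -- -(-n // k) is B's explicit integer ceiling division
    let num_rows : Int := -(PySem.Int.floordiv (-(items.length : Int)) num_columns)
    let cells : List String :=
      (items ++ List.replicate ((num_rows * num_columns - (items.length : Int)).toNat) "").map
        (fun it => pvBOLD ++ color ++ pvLjust it max_len ++ pvRESET)
    PySem.Str.join "\n" ((PySem.List.pyRange 0 num_rows 1).map
      (fun r => PySem.Str.join " " (PySem.List.slice cells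
        (some (r * num_columns)) (some ((r + 1) * num_columns)))))

-- ===== PRECONDITION & SPEC =====
def Spec_format_in_columns (items : List String) (term_width : Int) (color : String) (out : String) : Prop := out = format_in_columns_alt items term_width color
instance (items : List String) (term_width : Int) (color : String) (out : String) : Decidable (Spec_format_in_columns items term_width color out) := by unfold Spec_format_in_columns; infer_instance

-- ===== CLAIM (what is proved, stated in full; the proofs are below) =====
def Claim_equal_format_in_columns : Prop := ∀ (items : List String) (term_width : Int) (color : String), Dom_format_in_columns items term_width color → Spec_format_in_columns items term_width color (format_in_columns items term_width color)

-- ===== LEMMAS AND PROOFS =====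

-- chunks of width k+1 (the mathematical common form of both pipelines)
def pvChunks (k : Nat) : List String → List (List String)
  | [] => []
  | c :: cs => (c :: cs).take (k + 1) :: pvChunks k (cs.drop k)
termination_by l => l.length
decreasing_by simp

theorem pvSliceChunks (k m : Nat) (cells : List String) (hlen : cells.length = m * (k + 1)) :
    (List.range m).map (fun r => (cells.drop (r * (k + 1))).take (k + 1)) = pvChunks k cells := by
  induction m generalizing cells with
  | zero =>
    have hnil : cells = [] := List.eq_nil_of_length_eq_zero (by simp [hlen])
    simp [hnil, pvChunks]
  | succ m ih =>
    cases cells with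
    | nil =>
      rw [Nat.succ_mul] at hlen
      simp at hlen
    | cons c cs =>
      rw [List.range_succ_eq_map, List.map_cons, List.map_map, pvChunks]
      congr 1
      · simp
      · have hlen' : (cs.drop k).length = m * (k + 1) := by
          simp only [List.length_drop]
          rw [Nat.succ_mul] at hlen
          simp only [List.length_cons] at hlen
          omega
        rw [← ih (cs.drop k) hlen']
        refine List.map_congr_left (fun r hr => ?_)
        simp only [Function.comp_def]
        congr 1
        rw [List.drop_drop]
        have hidx : Nat.succ r * (k + 1) = (k + (r * (k + 1))) + 1 := by
          rw [Nat.succ_mul]; omega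
        rw [hidx, List.drop_succ_cons]

theorem pvChunks_flatten (k : Nat) (l : List String) : (pvChunks k l).flatten = l := by
  fun_induction pvChunks k l with
  | case1 => simp
  | case2 c cs ih =>
    simp only [List.flatten_cons, ih, List.take_succ_cons, List.cons_append, List.cons.injEq,
      true_and]
    exact List.take_append_drop k cs

theorem pvChunks_length_mem (k : Nat) (l : List String) :
    (k + 1) ∣ l.length → ∀ ch ∈ pvChunks k l, ch.length = k + 1 := by
  fun_induction pvChunks k l with
  | case1 => simp
  | case2 c cs ih =>
    intro h ch hm
    obtain ⟨m, hmm⟩ := h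
    simp only [List.length_cons] at hmm
    rcases m with _ | m
    · simp at hmm
    · rw [Nat.mul_succ] at hmm
      rcases List.mem_cons.mp hm with rfl | hm
      · simp; omega
      · refine ih ⟨m, ?_⟩ ch hm
        simp only [List.length_drop]
        omega

theorem pvChunks_ne_nil (k : Nat) (l : List String) (h : l ≠ []) : pvChunks k l ≠ [] := by
  cases l with
  | nil => exact absurd rfl h
  | cons c cs => rw [pvChunks]; simp

theorem pvChunks_map (k : Nat) (l : List String) (f : String → String) :
    pvChunks k (l.map f) = (pvChunks k l).map (List.map f) := by
  fun_induction pvChunks k l with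
  | case1 => simp [pvChunks]
  | case2 c cs ih =>
    rw [List.map_cons, pvChunks]
    simp only [← List.map_drop, ih]
    simp

-- index (q*(K+1)+j) mod (K+1) is j
theorem pvModAt (K q j : Nat) (hj : j < K + 1) :
    PySem.Int.mod ((q * (K + 1) + j : Nat) : Int) ((K + 1 : Nat) : Int) = ((j : Nat) : Int) := by
  rw [PySem.Int.mod_natCast]
  congr 1
  rw [Nat.add_comm, Nat.add_mul_mod_self_right, Nat.mod_eq_of_lt hj]

-- indices of one chunk, mod the width, are j, j+1, …, K
theorem pvModsChunk (K : Nat) (ys : List String) (q j : Nat) (hj : j + ys.length = K + 1) :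
    (PySem.List.enumerate ys ((q * (K + 1) + j : Nat) : Int)).map
        (fun p => PySem.Int.mod p.1 ((K + 1 : Nat) : Int))
      = (List.range' j ys.length).map (fun m : Nat => (m : Int)) := by
  induction ys generalizing j with
  | nil => simp [PySem.List.enumerate_nil]
  | cons y ys ih =>
    rw [PySem.List.enumerate_cons, List.map_cons]
    have hj' : j < K + 1 := by simp at hj; omega
    have h1 : ((q * (K + 1) + j : Nat) : Int) + 1 = ((q * (K + 1) + (j + 1) : Nat) : Int) := by
      push_cast; ring
    rw [h1, ih (j + 1) (by simp at hj ⊢; omega), pvModAt K q j hj']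
    simp [List.range'_succ]

-- one chunk contributes exactly its c-th element to column c
theorem pvFiltChunk (K : Nat) (ys : List String) (q j c : Nat) (hc : c < K + 1)
    (hj : j + ys.length = K + 1) :
    ((PySem.List.enumerate ys ((q * (K + 1) + j : Nat) : Int)).filter
        (fun p => PySem.Int.mod p.1 ((K + 1 : Nat) : Int) == ((c : Nat) : Int))).map (fun p => p.2)
      = if j ≤ c then [ys.getD (c - j) ""] else [] := by
  induction ys generalizing j with
  | nil =>
    rw [PySem.List.enumerate_nil, if_neg (by simp at hj; omega)]
    simp
  | cons y ys ih =>
    rw [PySem.List.enumerate_cons, List.filter_cons]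
    have hj' : j < K + 1 := by simp at hj; omega
    have h1 : ((q * (K + 1) + j : Nat) : Int) + 1 = ((q * (K + 1) + (j + 1) : Nat) : Int) := by
      push_cast; ring
    rw [h1]
    by_cases hjc : j = c
    · subst hjc
      simp only [pvModAt K q j hj', beq_self_eq_true, if_true, List.map_cons]
      rw [ih (j + 1) (by simp at hj ⊢; omega), if_neg (by omega), if_pos (le_refl j)]
      simp
    · have hbeq : (PySem.Int.mod ((q * (K + 1) + j : Nat) : Int) ((K + 1 : Nat) : Int)
          == ((c : Nat) : Int)) = false := by
        rw [pvModAt K q j hj']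
        simp
        exact_mod_cast hjc
      simp only [hbeq, Bool.false_eq_true, if_false]
      rw [ih (j + 1) (by simp at hj ⊢; omega)]
      by_cases hle : j ≤ c
      · rw [if_pos (by omega), if_pos hle]
        have h2 : c - j = (c - (j + 1)) + 1 := by omega
        rw [h2, List.getD_cons_succ]
      · rw [if_neg (by omega), if_neg hle]

-- over all chunks: the mods list is the column range repeated
theorem pvModsFlat (K : Nat) (C : List (List String)) (q : Nat)
    (hC : ∀ ch ∈ C, ch.length = K + 1) :
    (PySem.List.enumerate C.flatten ((q * (K + 1) : Nat) : Int)).map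
        (fun p => PySem.Int.mod p.1 ((K + 1 : Nat) : Int))
      = C.flatMap (fun _ => (List.range (K + 1)).map (fun m : Nat => (m : Int))) := by
  induction C generalizing q with
  | nil => simp [PySem.List.enumerate_nil]
  | cons ch C ih =>
    rw [List.flatten_cons, PySem.List.enumerate_append, List.map_append, List.flatMap_cons]
    have hlen : ch.length = K + 1 := hC ch (by simp)
    congr 1
    · have h0 := pvModsChunk K ch q 0 (by omega)
      simp only [Nat.add_zero] at h0
      rw [h0, hlen, List.range_eq_range']
    · have h1 : ((q * (K + 1) : Nat) : Int) + (ch.length : Int)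
          = (((q + 1) * (K + 1) : Nat) : Int) := by
        rw [hlen]; push_cast; ring
      rw [h1, ih (q + 1) (fun c hc => hC c (by simp [hc]))]

-- over all chunks: column c collects the c-th element of every chunk
theorem pvFiltFlat (K : Nat) (C : List (List String)) (q c : Nat) (hc : c < K + 1)
    (hC : ∀ ch ∈ C, ch.length = K + 1) :
    ((PySem.List.enumerate C.flatten ((q * (K + 1) : Nat) : Int)).filter
        (fun p => PySem.Int.mod p.1 ((K + 1 : Nat) : Int) == ((c : Nat) : Int))).map (fun p => p.2)
      = C.map (fun ch => ch.getD c "") := by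
  induction C generalizing q with
  | nil => simp [PySem.List.enumerate_nil]
  | cons ch C ih =>
    rw [List.flatten_cons, PySem.List.enumerate_append, List.filter_append, List.map_append,
      List.map_cons]
    have hlen : ch.length = K + 1 := hC ch (by simp)
    have hfirst := pvFiltChunk K ch q 0 c hc (by omega)
    simp only [Nat.add_zero] at hfirst
    have h1 : ((q * (K + 1) : Nat) : Int) + (ch.length : Int)
        = (((q + 1) * (K + 1) : Nat) : Int) := by
      rw [hlen]; push_cast; ring
    rw [hfirst, if_pos (Nat.zero_le c), Nat.sub_zero, h1,
      ih (q + 1) (fun d hd => hC d (by simp [hd])), List.singleton_append]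

-- s.update(l) = s when l adds nothing new
theorem pvUpdateSubset (s : PySem.Set Int) (l : List Int) (h : ∀ x ∈ l, x ∈ s) :
    PySem.Set.update s l = s := by
  induction l with
  | nil => rfl
  | cons x xs ih =>
    rw [PySem.Set.update_cons, PySem.Set.add_of_mem (h x (by simp))]
    exact ih (fun y hy => h y (by simp [hy]))

-- the key set of the bucketing loop is exactly the column range, in order
theorem pvKeysFlat (K : Nat) (C : List (List String)) (hne : C ≠ []) :
    PySem.Set.ofList (C.flatMap (fun _ => (List.range (K + 1)).map (fun m : Nat => (m : Int))))
      = (List.range (K + 1)).map (fun m : Nat => (m : Int)) := by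
  have hnd : ((List.range (K + 1)).map (fun m : Nat => (m : Int))).Nodup :=
    List.Nodup.map (fun a b h => by exact_mod_cast h) List.nodup_range
  cases C with
  | nil => contradiction
  | cons ch C =>
    rw [List.flatMap_cons, PySem.Set.ofList_append, PySem.Set.ofList_eq_self_of_nodup _ hnd]
    refine pvUpdateSubset _ _ (fun x hx => ?_)
    simp only [List.mem_flatMap] at hx
    obtain ⟨_, _, h2⟩ := hx
    exact h2

-- reading a chunk back off by positions 0..n-1
theorem pvGetDRange (ch : List String) (n : Nat) (h : ch.length = n) :
    (List.range n).map (fun c => ch.getD c "") = ch := by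
  subst h
  refine List.ext_getElem (by simp) (fun i h1 h2 => ?_)
  simp at h1
  simp [List.getD_eq_getElem?_getD, List.getElem?_eq_getElem h1]

-- transposing columns that are all projections of the same row list gives back the rows
theorem pvZsAux (C : List (List String)) (g0 : List String → String)
    (gs : List (List String → String)) :
    pvZipAux (C.map g0) (gs.map (fun g => C.map g))
      = C.map (fun ch => g0 ch :: gs.map (fun g => g ch)) := by
  induction C with
  | nil => simp [pvZipAux]
  | cons ch C ih =>
    rw [List.map_cons, pvZipAux]
    have hall : ((gs.map (fun g => (ch :: C).map g)).all (fun c => !c.isEmpty)) = true := by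
      simp [List.all_map]
    rw [if_pos hall]
    have hheads : (gs.map (fun g => (ch :: C).map g)).map (fun c => c.headD "")
        = gs.map (fun g => g ch) := by
      simp [List.map_map, Function.comp]
    have htails : (gs.map (fun g => (ch :: C).map g)).map (fun c => c.tail)
        = gs.map (fun g => C.map g) := by
      simp [List.map_map, Function.comp]
    rw [hheads, htails, ih, List.map_cons]

-- the core: A's dict-then-transpose equals chunking, for any cell-decorating function dec
theorem pvCore (padded : List String) (nc : Int) (dec : String → String)
    (h1 : 1 ≤ nc) (hdvd : nc.toNat ∣ padded.length) (hne : padded ≠ []) :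
    pvZipStar ((((PySem.List.enumerate padded).foldl
        (fun d p => PySem.Dict.modify d (PySem.Int.mod p.1 nc) [] (fun l => l ++ [dec p.2]))
        PySem.Dict.empty)).values)
      = pvChunks (nc.toNat - 1) (padded.map dec) := by
  obtain ⟨K, rfl⟩ : ∃ K : Nat, nc = ((K + 1 : Nat) : Int) := ⟨nc.toNat - 1, by omega⟩
  have htn : ((K + 1 : Nat) : Int).toNat = K + 1 := by simp
  rw [htn] at hdvd ⊢
  have hflat : (pvChunks K padded).flatten = padded := pvChunks_flatten K padded
  have hC : ∀ ch ∈ pvChunks K padded, ch.length = K + 1 := pvChunks_length_mem K padded hdvd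
  have hCne : pvChunks K padded ≠ [] := pvChunks_ne_nil K padded hne
  have hnodup : (((PySem.List.enumerate padded).foldl
      (fun d p => PySem.Dict.modify d (PySem.Int.mod p.1 ((K + 1 : Nat) : Int)) []
        (fun l => l ++ [dec p.2])) PySem.Dict.empty)).keys.Nodup :=
    PySem.Dict.nodup_keys_foldl_modify_key (PySem.List.enumerate padded)
      (fun p => PySem.Int.mod p.1 ((K + 1 : Nat) : Int)) []
      (fun _ p => fun l => l ++ [dec p.2]) PySem.Dict.empty PySem.Dict.nodup_keys_empty
  have hkeys : (((PySem.List.enumerate padded).foldl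
      (fun d p => PySem.Dict.modify d (PySem.Int.mod p.1 ((K + 1 : Nat) : Int)) []
        (fun l => l ++ [dec p.2])) PySem.Dict.empty)).keys
      = (List.range (K + 1)).map (fun m : Nat => (m : Int)) := by
    rw [PySem.Dict.keys_foldl_modify_key (PySem.List.enumerate padded)
      (fun p => PySem.Int.mod p.1 ((K + 1 : Nat) : Int)) []
      (fun _ p => fun l => l ++ [dec p.2]) PySem.Dict.empty]
    rw [PySem.Dict.keys_empty, PySem.Set.update_nil_left]
    have hm := pvModsFlat K (pvChunks K padded) 0 hC
    rw [hflat] at hm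
    simp only [Nat.zero_mul, Nat.cast_zero] at hm
    rw [hm]
    exact pvKeysFlat K (pvChunks K padded) hCne
  have hget : ∀ c : Nat, c < K + 1 →
      (((PySem.List.enumerate padded).foldl
        (fun d p => PySem.Dict.modify d (PySem.Int.mod p.1 ((K + 1 : Nat) : Int)) []
          (fun l => l ++ [dec p.2])) PySem.Dict.empty)).getD ((c : Nat) : Int) []
      = (pvChunks K padded).map (fun ch => dec (ch.getD c "")) := by
    intro c hc
    have hfold : ((PySem.List.enumerate padded).foldl
        (fun d p => PySem.Dict.modify d (PySem.Int.mod p.1 ((K + 1 : Nat) : Int)) []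
          (fun l => l ++ [dec p.2])) PySem.Dict.empty)
        = (((PySem.List.enumerate padded).map
            (fun p => (PySem.Int.mod p.1 ((K + 1 : Nat) : Int), dec p.2))).foldl
          (fun d q => PySem.Dict.modify d q.1 [] (fun l => l ++ [q.2])) PySem.Dict.empty) := by
      rw [List.foldl_map]
    rw [hfold, PySem.Dict.getD_foldl_modify_append, PySem.Dict.getD_empty, List.nil_append]
    rw [List.filter_map, List.map_map]
    have hff := pvFiltFlat K (pvChunks K padded) 0 c hc hC
    rw [hflat] at hff
    simp only [Nat.zero_mul, Nat.cast_zero] at hff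
    calc ((PySem.List.enumerate padded).filter
            ((fun p => p.1 == ((c : Nat) : Int)) ∘
              (fun p => (PySem.Int.mod p.1 ((K + 1 : Nat) : Int), dec p.2)))).map
          ((fun p => p.2) ∘ (fun p => (PySem.Int.mod p.1 ((K + 1 : Nat) : Int), dec p.2)))
        = ((PySem.List.enumerate padded).filter
            (fun p => PySem.Int.mod p.1 ((K + 1 : Nat) : Int) == ((c : Nat) : Int))).map
          (fun p => dec p.2) := rfl
      _ = (((PySem.List.enumerate padded).filter
            (fun p => PySem.Int.mod p.1 ((K + 1 : Nat) : Int) == ((c : Nat) : Int))).map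
          (fun p => p.2)).map dec := by rw [List.map_map]; rfl
      _ = ((pvChunks K padded).map (fun ch => ch.getD c "")).map dec := by rw [hff]
      _ = (pvChunks K padded).map (fun ch => dec (ch.getD c "")) := by rw [List.map_map]; rfl
  have hvals : (((PySem.List.enumerate padded).foldl
      (fun d p => PySem.Dict.modify d (PySem.Int.mod p.1 ((K + 1 : Nat) : Int)) []
        (fun l => l ++ [dec p.2])) PySem.Dict.empty)).values
      = (List.range (K + 1)).map
          (fun c => (pvChunks K padded).map (fun ch => dec (ch.getD c ""))) := by
    rw [PySem.Dict.values_eq_map_keys _ hnodup [], hkeys, List.map_map]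
    refine List.map_congr_left (fun c hcm => ?_)
    exact hget c (List.mem_range.mp hcm)
  rw [hvals, List.range_succ_eq_map, List.map_cons]
  show pvZipAux ((pvChunks K padded).map (fun ch => dec (ch.getD 0 "")))
      (((List.range K).map Nat.succ).map
        (fun c => (pvChunks K padded).map (fun ch => dec (ch.getD c "")))) = _
  have hz := pvZsAux (pvChunks K padded) (fun ch => dec (ch.getD 0 ""))
      (((List.range K).map Nat.succ).map (fun c => fun ch => dec (ch.getD c "")))
  simp only [List.map_map, Function.comp_def] at hz ⊢
  rw [hz, pvChunks_map]
  refine List.map_congr_left (fun ch hch => ?_)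
  have h8 := pvGetDRange ch (K + 1) (hC ch hch)
  conv_rhs => rw [← h8]
  simp [List.map_map, Function.comp_def, List.range_succ_eq_map]

-- ===== VERDICT (by name: the statement is the Claim_ definition above) =====
theorem format_in_columns_spec : Claim_equal_format_in_columns := by
  intro items term_width color _
  unfold Spec_format_in_columns
  by_cases h : items = []
  · simp [format_in_columns, format_in_columns_alt, h]
  · simp only [format_in_columns, format_in_columns_alt, if_neg h]
    generalize (PySem.List.max? (items.map (fun it => PySem.Str.len it)) (fun x => x)).getD 0 = ml
    generalize hnc : max 1 (PySem.Int.floordiv term_width (ml + 2)) = nc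
    generalize hnr : -(PySem.Int.floordiv (-(items.length : Int)) nc) = nr
    generalize hpad : items ++ List.replicate ((nr * nc - (items.length : Int)).toNat) "" = padded
    have h1 : 1 ≤ nc := hnc ▸ le_max_left 1 _
    have hb : (0 : Int) < nc := by omega
    have hceil := (PySem.Int.neg_floordiv_neg_eq_iff_of_pos hb).mp hnr
    have hL : 0 < items.length := List.length_pos_iff.mpr h
    have hnr1 : 1 ≤ nr := by nlinarith [hceil.1, hceil.2]
    have hcast : nr * nc = ((nr.toNat * nc.toNat : Nat) : Int) := by
      push_cast [Int.toNat_of_nonneg (by omega : (0 : Int) ≤ nr),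
        Int.toNat_of_nonneg (by omega : (0 : Int) ≤ nc)]
      ring
    have hplen : padded.length = nr.toNat * nc.toNat := by
      rw [← hpad]
      simp only [List.length_append, List.length_replicate]
      omega
    have hdvd : nc.toNat ∣ padded.length := by
      rw [hplen]; exact dvd_mul_left _ _
    have hne : padded ≠ [] := by
      rw [← hpad]; simp [h]
    obtain ⟨K, hK⟩ : ∃ K : Nat, nc = ((K + 1 : Nat) : Int) := ⟨nc.toNat - 1, by omega⟩
    subst hK
    have htn : ((K + 1 : Nat) : Int).toNat = K + 1 := by simp
    have hnr' : nr = ((nr.toNat : Nat) : Int) := (Int.toNat_of_nonneg (by omega)).symm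
    rw [hnr', PySem.List.pyRange_zero_natCast, List.map_map]
    have hclen : (padded.map (fun it => pvBOLD ++ color ++ pvLjust it ml ++ pvRESET)).length
        = nr.toNat * (K + 1) := by
      rw [List.length_map, hplen, htn]
    have hBrows : (List.range nr.toNat).map
        ((fun r => PySem.Str.join " "
            (PySem.List.slice (padded.map (fun it => pvBOLD ++ color ++ pvLjust it ml ++ pvRESET))
              (some (r * ((K + 1 : Nat) : Int))) (some ((r + 1) * ((K + 1 : Nat) : Int)))))
          ∘ (fun k : Nat => (k : Int)))
        = (pvChunks K (padded.map (fun it => pvBOLD ++ color ++ pvLjust it ml ++ pvRESET))).map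
            (fun row => PySem.Str.join " " row) := by
      rw [← pvSliceChunks K nr.toNat _ hclen, List.map_map]
      refine List.map_congr_left (fun rn _ => ?_)
      simp only [Function.comp_def]
      have e1 : ((rn : Nat) : Int) * ((K + 1 : Nat) : Int) = ((rn * (K + 1) : Nat) : Int) := by
        push_cast; ring
      have e2 : (((rn : Nat) : Int) + 1) * ((K + 1 : Nat) : Int)
          = ((rn * (K + 1) : Nat) : Int) + ((K + 1 : Nat) : Int) := by
        push_cast; ring
      rw [e1, e2, PySem.List.slice_natCast_add]
    rw [hBrows]
    congr 1
    have hcore := pvCore padded ((K + 1 : Nat) : Int)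
      (fun it => pvBOLD ++ color ++ pvLjust it ml ++ pvRESET) h1 hdvd hne
    rw [htn, Nat.add_sub_cancel] at hcore
    exact congrArg _ hcore
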